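-- pv_equiv track=rewrite | github.com/JohhannasReyn/Markdown2Dir_and_Dir2Md | code_block_processor.py | reduce_indentation
-- ===== SOURCE A (Python) =====
-- def reduce_indentation(code, reduction_level):
--     """
--     Reduce the indentation of code content by the specified number of spaces.
--     Handles both spaces and tabs, converting tabs to spaces for consistency.
--
--     Args:
--         code: The code content to reduce indentation for
--         reduction_level: Number of spaces to remove from each line
--
--     Returns:
--         Code with reduced indentation
--     """
--     if reduction_level <= 0:
--         return code
--
--     lines = code.split('\n')
--     result_lines = []
--
--     for line in lines:
--         # Convert tabs to spaces for consistent handling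
--         expanded_line = line.expandtabs(4)
--
--         # Calculate how many leading spaces this line has
--         leading_spaces = len(expanded_line) - len(expanded_line.lstrip(' '))
--
--         # Remove up to reduction_level spaces
--         spaces_to_remove = min(leading_spaces, reduction_level)
--         result_lines.append(expanded_line[spaces_to_remove:])
--
--     return '\n'.join(result_lines)
-- ===== SOURCE B (Python) =====
-- def reduce_indentation(code, reduction_level):
--     """One-pass streaming rewrite: expand tabs and strip up to reduction_level
--     leading spaces per line in a single scan, no split/join or per-line passes."""
--     if reduction_level <= 0:
--         return code
--     out = []
--     col = 0                      # column in the current physical line (resets at \n and \r)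
--     skip = reduction_level       # spaces still removable at the current line start
--     at_start = True              # still in the leading-space region of a '\n'-line
--     for ch in code:
--         if ch == '\n':
--             out.append(ch)
--             col = 0
--             skip = reduction_level
--             at_start = True
--         elif ch == '\r':
--             out.append(ch)
--             col = 0
--             at_start = False
--         elif ch == '\t':
--             pad = 4 - col % 4
--             col += pad
--             if at_start:
--                 d = min(skip, pad)
--                 skip -= d
--                 out.append(' ' * (pad - d))
--             else:
--                 out.append(' ' * pad)
--         elif ch == ' ':
--             col += 1
--             if at_start and skip > 0:
--                 skip -= 1
--             else:
--                 out.append(' ')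
--         else:
--             col += 1
--             at_start = False
--             out.append(ch)
--     return ''.join(out)
-- ===== Notes on version B (the rewrite author's own statement) =====
-- stated objective: alternative
-- what changed: Replaces A's split('\n') / per-line expandtabs / lstrip-count / slice / join pipeline with a single character-level scan that expands tabs and strips up to reduction_level leading spaces per line in one pass, with no split or per-line passes.
import Mathlib
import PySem

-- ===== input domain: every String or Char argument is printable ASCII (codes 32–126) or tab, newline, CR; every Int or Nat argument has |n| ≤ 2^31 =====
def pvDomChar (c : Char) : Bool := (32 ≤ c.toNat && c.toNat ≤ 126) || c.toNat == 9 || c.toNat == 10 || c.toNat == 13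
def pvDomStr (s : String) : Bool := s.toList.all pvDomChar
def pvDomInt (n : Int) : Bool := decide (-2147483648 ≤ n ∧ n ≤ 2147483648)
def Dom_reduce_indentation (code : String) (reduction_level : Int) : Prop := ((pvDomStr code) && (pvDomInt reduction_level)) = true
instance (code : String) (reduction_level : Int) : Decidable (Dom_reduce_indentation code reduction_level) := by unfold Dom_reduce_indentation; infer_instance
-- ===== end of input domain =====

-- B replaces A's split('\n')/per-line expandtabs/lstrip-count/slice/join pipeline with a
-- single character-level scan (objective: alternative, same asymptotic cost).

-- ===== PORT A =====
-- hand port of str.expandtabs(4): exact — a tab pads to the next multiple of 4,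
-- the column resets to 0 at '\n' and '\r', every other character advances it by 1
def pvExpandTabs4 : Nat → List Char → List Char
  | _, [] => []
  | col, c :: cs =>
    if c = '\t' then
      let pad := 4 - col % 4
      List.replicate pad ' ' ++ pvExpandTabs4 (col + pad) cs
    else if c = '\n' ∨ c = '\r' then c :: pvExpandTabs4 0 cs
    else c :: pvExpandTabs4 (col + 1) cs

def reduce_indentation (code : String) (reduction_level : Int) : String :=
  if reduction_level ≤ 0 then code
  else
    let lines := PySem.Chars.splitOn code.toList ['\n']
    let result_lines := lines.map (fun line =>
      let expanded := pvExpandTabs4 0 line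
      -- len(expanded) - len(expanded.lstrip(' ')): lstrip(' ') is dropWhile (· == ' '), exact
      let leading : Int := (expanded.length : Int) - ((expanded.dropWhile (· == ' ')).length : Int)
      let spaces_to_remove := min leading reduction_level
      PySem.List.slice expanded (some spaces_to_remove) none)
    String.mk (PySem.Chars.join ['\n'] result_lines)

-- ===== PORT B =====
-- the streaming loop of Source B: state (col, skip, at_start), output built front-to-back
def pvStream (rl : Int) : List Char → Nat → Int → Bool → List Char
  | [], _, _, _ => []
  | c :: cs, col, skip, atStart =>
    if c = '\n' then c :: pvStream rl cs 0 rl true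
    else if c = '\r' then c :: pvStream rl cs 0 skip false
    else if c = '\t' then
      let pad := 4 - col % 4
      if atStart then
        let d := min skip (pad : Int)
        List.replicate (pad - d.toNat) ' ' ++ pvStream rl cs (col + pad) (skip - d) true
      else List.replicate pad ' ' ++ pvStream rl cs (col + pad) skip false
    else if c = ' ' then
      if atStart ∧ 0 < skip then pvStream rl cs (col + 1) (skip - 1) true
      else ' ' :: pvStream rl cs (col + 1) skip atStart
    else c :: pvStream rl cs (col + 1) skip false

def reduce_indentation_alt (code : String) (reduction_level : Int) : String :=
  if reduction_level ≤ 0 then code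
  else String.mk (pvStream reduction_level code.toList 0 reduction_level true)

-- ===== PRECONDITION & SPEC =====
def Spec_reduce_indentation (code : String) (reduction_level : Int) (out : String) : Prop := out = reduce_indentation_alt code reduction_level
instance (code : String) (reduction_level : Int) (out : String) : Decidable (Spec_reduce_indentation code reduction_level out) := by unfold Spec_reduce_indentation; infer_instance

-- ===== CLAIM (what is proved, stated in full; the proofs are below) =====
def Claim_equal_reduce_indentation : Prop := ∀ (code : String) (reduction_level : Int), Dom_reduce_indentation code reduction_level → Spec_reduce_indentation code reduction_level (reduce_indentation code reduction_level)

-- ===== LEMMAS AND PROOFS =====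

-- split on '\n' in its natural recursive form
def pvSplitNL : List Char → List (List Char)
  | [] => [[]]
  | c :: cs => if c = '\n' then [] :: pvSplitNL cs else (pvSplitNL cs).modifyHead (c :: ·)

-- drop up to s leading spaces
def pvStrip : Nat → List Char → List Char
  | 0, cs => cs
  | _ + 1, [] => []
  | s + 1, c :: cs => if c = ' ' then pvStrip s cs else c :: cs

theorem pvSplitNL_ne_nil (cs : List Char) : pvSplitNL cs ≠ [] := by
  induction cs with
  | nil => simp [pvSplitNL]
  | cons c cs ih =>
    simp only [pvSplitNL]
    split
    · simp
    · cases h : pvSplitNL cs with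
      | nil => exact absurd h ih
      | cons x xs => simp [List.modifyHead]

theorem pvSplitNL_cons_ne (c : Char) (cs p : List Char) (ps : List (List Char))
    (hc : c ≠ '\n') (h : pvSplitNL cs = p :: ps) :
    pvSplitNL (c :: cs) = (c :: p) :: ps := by
  simp [pvSplitNL, hc, h, List.modifyHead]

theorem pvSplit_go (cs : List Char) : ∀ fuel cur acc, cs.length ≤ fuel →
    PySem.Chars.splitOn.go ['\n'] fuel cs cur acc
      = acc.reverse ++ (pvSplitNL cs).modifyHead (cur.reverse ++ ·) := by
  induction cs with
  | nil =>
    intro fuel cur acc _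
    cases fuel <;> simp [PySem.Chars.splitOn.go, pvSplitNL]
  | cons c cs ih =>
    intro fuel cur acc hf
    cases fuel with
    | zero => simp at hf
    | succ f =>
      simp only [List.length_cons] at hf
      simp only [PySem.Chars.splitOn.go]
      by_cases hc : c = '\n'
      · subst hc
        have hpre : (['\n'].isPrefixOf ('\n' :: cs)) = true := by
          simp [List.isPrefixOf_nil_left]
        rw [hpre]
        simp only [if_true]
        rw [show List.drop (['\n'].length) ('\n' :: cs) = cs from rfl]
        rw [ih f [] ((List.reverse cur) :: acc) (by omega)]
        simp only [pvSplitNL, List.modifyHead, List.reverse_nil, List.nil_append]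
        cases hh : pvSplitNL cs with
        | nil => exact absurd hh (pvSplitNL_ne_nil cs)
        | cons x xs => simp
      · have hpre : (['\n'].isPrefixOf (c :: cs)) = false := by
          simp [List.isPrefixOf_cons₂]
          intro h; exact absurd h.symm hc
        rw [hpre]
        simp only [Bool.false_eq_true, if_false]
        rw [ih f (c :: cur) acc (by omega)]
        cases h : pvSplitNL cs with
        | nil => exact absurd h (pvSplitNL_ne_nil cs)
        | cons x xs => simp [pvSplitNL_cons_ne c cs x xs hc h, List.modifyHead]

theorem pvSplitOn_eq (cs : List Char) : PySem.Chars.splitOn cs ['\n'] = pvSplitNL cs := by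
  have h := pvSplit_go cs (cs.length + 1) [] [] (by omega)
  rw [PySem.Chars.splitOn, h]
  cases hh : pvSplitNL cs with
  | nil => exact absurd hh (pvSplitNL_ne_nil cs)
  | cons x xs => simp [List.modifyHead]

theorem pvJoinNL (x : List Char) (xs : List (List Char)) :
    PySem.Chars.join ['\n'] (x :: xs) = x ++ xs.flatMap (fun l => '\n' :: l) := by
  induction xs generalizing x with
  | nil => simp [PySem.Chars.join, List.intercalate, List.intersperse_single]
  | cons y ys ih =>
    have h := ih y
    simp only [PySem.Chars.join, List.intercalate] at h ⊢
    simp only [List.intersperse_cons₂, List.flatten_cons, List.flatMap_cons]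
    rw [h]
    simp

-- pvStrip in terms of drop/min (the shape A's slice takes)
theorem pvStrip_eq_drop (cs : List Char) : ∀ k,
    pvStrip k cs = cs.drop (min ((cs.takeWhile (fun c => c == ' ')).length) k) := by
  induction cs with
  | nil => intro k; cases k <;> simp [pvStrip]
  | cons c cs ih =>
    intro k
    cases k with
    | zero => simp [pvStrip]
    | succ k =>
      by_cases hc : c = ' '
      · subst hc
        have hbeq : ((' ' : Char) == ' ') = true := by decide
        simp only [pvStrip, List.takeWhile, hbeq, List.length_cons]
        rw [ih k]
        have : min ((cs.takeWhile (fun c => c == ' ')).length + 1) (k + 1)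
            = min ((cs.takeWhile (fun c => c == ' ')).length) k + 1 := by omega
        rw [this]
        simp
      · have hbeq : (c == ' ') = false := by simpa using hc
        simp [pvStrip, hc, List.takeWhile, hbeq]

theorem pvStrip_nil (k : Nat) : pvStrip k [] = [] := by cases k <;> rfl

theorem pvStrip_cons_ne (k : Nat) (c : Char) (cs : List Char) (h : c ≠ ' ') :
    pvStrip k (c :: cs) = c :: cs := by
  cases k with
  | zero => rfl
  | succ k => simp [pvStrip, h]

theorem pvStrip_replicate (n : Nat) : ∀ k (ys : List Char),
    pvStrip k (List.replicate n ' ' ++ ys)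
      = List.replicate (n - min k n) ' ' ++ pvStrip (k - min k n) ys := by
  induction n with
  | zero => intro k ys; simp
  | succ n ih =>
    intro k ys
    cases k with
    | zero => simp [pvStrip]
    | succ k =>
      simp only [List.replicate_succ, List.cons_append, pvStrip]
      rw [ih k ys]
      have h1 : n + 1 - min (k + 1) (n + 1) = n - min k n := by omega
      have h2 : k + 1 - min (k + 1) (n + 1) = k - min k n := by omega
      rw [h1, h2]
      simp

-- the per-line value A computes
def pvLine (rl : Int) (l : List Char) : List Char := pvStrip rl.toNat (pvExpandTabs4 0 l)

-- MAIN INVARIANT: the stream on cs from state (col, skip, at_start) is the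
-- (possibly stripped) expansion of the first '\n'-line followed by the processed rest.
theorem pvStream_eq (rl : Int) (hrl : 0 < rl) (cs : List Char) : ∀ (col : Nat) (s : Int) (b : Bool), 0 ≤ s →
    pvStream rl cs col s b
      = (if b then pvStrip s.toNat (pvExpandTabs4 col (pvSplitNL cs).headI)
         else pvExpandTabs4 col (pvSplitNL cs).headI)
        ++ ((pvSplitNL cs).tail).flatMap (fun l => '\n' :: pvLine rl l) := by
  induction cs with
  | nil =>
    intro col s b _
    cases b <;> simp [pvStream, pvSplitNL, pvExpandTabs4, pvStrip_nil]
  | cons c cs ih =>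
    intro col s b hs
    obtain ⟨p, ps, hP⟩ : ∃ p ps, pvSplitNL cs = p :: ps := by
      cases h : pvSplitNL cs with
      | nil => exact absurd h (pvSplitNL_ne_nil cs)
      | cons p ps => exact ⟨p, ps, rfl⟩
    by_cases hn : c = '\n'
    · subst hn
      simp only [pvStream, pvSplitNL, hP]
      rw [ih 0 rl true (le_of_lt hrl)]
      simp only [hP]
      cases b <;> simp [pvStrip_nil, pvExpandTabs4, pvLine]
    · have hsplit : pvSplitNL (c :: cs) = (c :: p) :: ps := pvSplitNL_cons_ne c cs p ps hn hP
      simp only [pvStream]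
      rw [if_neg hn]
      by_cases hr : c = '\r'
      · subst hr
        rw [if_pos rfl]
        rw [ih 0 s false hs]
        have hexp : pvExpandTabs4 col ('\r' :: p) = '\r' :: pvExpandTabs4 0 p := by
          simp [pvExpandTabs4]
        simp only [hP, hsplit, List.headI, List.tail, hexp]
        cases b with
        | false => simp
        | true => simp [pvStrip_cons_ne s.toNat '\r' (pvExpandTabs4 0 p) (by decide)]
      · rw [if_neg hr]
        by_cases ht : c = '\t'
        · subst ht
          rw [if_pos rfl]
          have hexp : pvExpandTabs4 col ('\t' :: p)
              = List.replicate (4 - col % 4) ' ' ++ pvExpandTabs4 (col + (4 - col % 4)) p := by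
            simp [pvExpandTabs4]
          cases b with
          | false =>
            simp only [Bool.false_eq_true, if_false]
            rw [ih (col + (4 - col % 4)) s false hs]
            simp [hP, hsplit, hexp]
          | true =>
            simp only [if_true]
            have hd0 : (0:Int) ≤ min s ((4 - col % 4 : Nat) : Int) := by positivity
            rw [ih (col + (4 - col % 4)) (s - min s ((4 - col % 4 : Nat) : Int)) true (by omega)]
            simp only [hP, hsplit, List.headI, List.tail, hexp]
            rw [pvStrip_replicate]
            have e1 : (min s ((4 - col % 4 : Nat) : Int)).toNat
                = min s.toNat (4 - col % 4) := by omega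
            have e2 : s.toNat - min s.toNat (4 - col % 4)
                = (s - min s ((4 - col % 4 : Nat) : Int)).toNat := by omega
            have e3 : 4 - col % 4 - min s.toNat (4 - col % 4)
                = 4 - col % 4 - (min s ((4 - col % 4 : Nat) : Int)).toNat := by omega
            rw [e1, e2, e3]
            simp
        · rw [if_neg ht]
          by_cases hsp : c = ' '
          · subst hsp
            rw [if_pos rfl]
            have hexp : pvExpandTabs4 col (' ' :: p) = ' ' :: pvExpandTabs4 (col + 1) p := by
              simp [pvExpandTabs4]
            cases b with
            | false =>
              rw [if_neg (by simp)]
              rw [ih (col + 1) s false hs]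
              simp [hP, hsplit, hexp]
            | true =>
              by_cases hpos : 0 < s
              · rw [if_pos ⟨rfl, hpos⟩, ih (col + 1) (s - 1) true (by omega)]
                simp only [hP, hsplit, List.headI, List.tail, hexp, if_true]
                have hk : s.toNat = (s - 1).toNat + 1 := by omega
                rw [hk]
                simp [pvStrip]
              · have hs0 : s = 0 := le_antisymm (by omega) hs
                subst hs0
                rw [if_neg (by simp), ih (col + 1) 0 true (by omega)]
                simp [hP, hsplit, hexp, pvStrip]
          · rw [if_neg hsp]
            have hexp : pvExpandTabs4 col (c :: p) = c :: pvExpandTabs4 (col + 1) p := by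
              simp [pvExpandTabs4, ht, hn, hr]
            rw [ih (col + 1) s false hs]
            simp only [hP, hsplit, List.headI, List.tail, hexp]
            cases b with
            | false => simp
            | true => simp [pvStrip_cons_ne s.toNat c (pvExpandTabs4 (col + 1) p) hsp]

-- A's per-line computation is pvLine
theorem pvLineA_eq (rl : Int) (hrl : 0 < rl) (l : List Char) :
    PySem.List.slice (pvExpandTabs4 0 l)
      (some (min (((pvExpandTabs4 0 l).length : Int)
        - (((pvExpandTabs4 0 l).dropWhile (· == ' ')).length : Int)) rl)) none
      = pvLine rl l := by
  set e := pvExpandTabs4 0 l with he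
  have hdw : (e.dropWhile (· == ' ')).length ≤ e.length := by
    simpa using List.length_dropWhile_le (p := (· == ' ')) (l := e)
  have htd : (e.takeWhile (fun c => c == ' ')).length + (e.dropWhile (· == ' ')).length
      = e.length := by
    rw [← List.length_append, List.takeWhile_append_dropWhile]
  have hlead : ((e.length : Int) - ((e.dropWhile (· == ' ')).length : Int))
      = ((e.takeWhile (fun c => c == ' ')).length : Int) := by
    omega
  rw [hlead]
  have hmin0 : (0:Int) ≤ min ((e.takeWhile (fun c => c == ' ')).length : Int) rl := by positivity
  rw [PySem.List.slice_from e hmin0]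
  rw [pvLine, ← he, pvStrip_eq_drop]
  congr 1
  omega

theorem pvFlatMap_map (g : List Char → List Char) (ps : List (List Char)) :
    (ps.map g).flatMap (fun l => '\n' :: l) = ps.flatMap (fun l => '\n' :: g l) := by
  induction ps with
  | nil => rfl
  | cons q qs ih => simp [ih]

-- ===== VERDICT (by name: the statement is the Claim_ definition above) =====
theorem reduce_indentation_spec : Claim_equal_reduce_indentation := by
  intro code rl _
  unfold Spec_reduce_indentation reduce_indentation reduce_indentation_alt
  by_cases h : rl ≤ 0
  · simp [h]
  · have hrl : 0 < rl := by omega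
    simp only [if_neg h]
    apply congrArg String.mk
    obtain ⟨p, ps, hP⟩ : ∃ p ps, pvSplitNL code.toList = p :: ps := by
      cases hh : pvSplitNL code.toList with
      | nil => exact absurd hh (pvSplitNL_ne_nil _)
      | cons p ps => exact ⟨p, ps, rfl⟩
    rw [pvStream_eq rl hrl code.toList 0 rl true (le_of_lt hrl)]
    simp only [pvSplitOn_eq, hP, List.headI, List.tail, List.map_cons, if_true]
    rw [pvJoinNL, pvFlatMap_map]
    simp only [pvLineA_eq rl hrl]
    rfl
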